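-- pv_equiv track=rewrite | github.com/CheungBH/yolov7 | strategy/utils.py | compute_frequency_matrix_unequal_partition
-- ===== SOURCE A (Python) =====
-- def compute_frequency_matrix_unequal_partition(M, N, points, m_boundaries, n_boundaries):
--     """
--     计算频率矩阵，支持不等分分割。
--
--     参数:
--     - M: 图像的高度
--     - N: 图像的宽度
--     - points: 点的坐标列表，格式为 [(x1, y1), (x2, y2), ...]
--     - m_boundaries: 高度方向的分割边界，例如 [0, 2, 3, 5, 10]
--     - n_boundaries: 宽度方向的分割边界，例如 [0, 1, 4, 7, 10]
--
--     返回: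
--     - frequency_matrix: 频率矩阵，表示每个区域内的点数
--     """
--     # 获取高度和宽度方向的分割段数
--     m_segments = len(m_boundaries) - 1
--     n_segments = len(n_boundaries) - 1
--
--     # 初始化频率矩阵
--     frequency_matrix = [[0 for _ in range(n_segments)] for _ in range(m_segments)]
--
--     # 遍历所有点并计算其所属区域
--     for x, y in points:
--         # 检查点是否在图像范围内
--         if 0 <= x < N and 0 <= y < M:
--             # 找到点所属的高度区域（m方向）
--             row = None
--             for i in range(m_segments):
--                 if m_boundaries[i] <= y < m_boundaries[i + 1]:
--                     row = i
--                     break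
--
--             # 找到点所属的宽度区域（n方向）
--             col = None
--             for j in range(n_segments):
--                 if n_boundaries[j] <= x < n_boundaries[j + 1]:
--                     col = j
--                     break
--
--             # 如果点成功分配到某个区域，则更新频率矩阵
--             if row is not None and col is not None:
--                 frequency_matrix[row][col] += 1
--
--     return frequency_matrix
-- ===== SOURCE B (Python) =====
-- def _assign(boundaries, values):
--     """Segment-major assignment: each interval [boundaries[i], boundaries[i+1]), taken in
--     order, claims every still-unassigned value it contains; a value keeps the index of the
--     first interval that claimed it."""
--     res = [None] * len(values)
--     for i, (lo, hi) in enumerate(zip(boundaries, boundaries[1:])):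
--         res = [i if r is None and lo <= v < hi else r for r, v in zip(res, values)]
--     return res
--
--
-- def compute_frequency_matrix_unequal_partition(M, N, points, m_boundaries, n_boundaries):
--     # Staged pipeline: filter once, then two segment-major sweeps assign every point its
--     # row and its column in bulk, then tally the paired assignments.
--     pts = [(x, y) for x, y in points if 0 <= x < N and 0 <= y < M]
--     rows = _assign(m_boundaries, [y for _, y in pts])
--     cols = _assign(n_boundaries, [x for x, _ in pts])
--     matrix = [[0] * (len(n_boundaries) - 1) for _ in range(len(m_boundaries) - 1)]
--     for r, c in zip(rows, cols):
--         if r is not None and c is not None: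
--             matrix[r][c] += 1
--     return matrix
-- ===== Notes on version B (the rewrite author's own statement) =====
-- stated objective: alternative
-- what changed: A is point-major: one loop over points with an inner break-scan per point to locate its row and column and an in-place matrix increment; B is segment-major and staged: it filters the in-range points once, then each boundary interval, in order, sweeps the whole point list claiming every still-unassigned point (bulk row/column assignment via rebuilt assignment vectors), and a final pass tallies the paired assignments.
import Mathlib
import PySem

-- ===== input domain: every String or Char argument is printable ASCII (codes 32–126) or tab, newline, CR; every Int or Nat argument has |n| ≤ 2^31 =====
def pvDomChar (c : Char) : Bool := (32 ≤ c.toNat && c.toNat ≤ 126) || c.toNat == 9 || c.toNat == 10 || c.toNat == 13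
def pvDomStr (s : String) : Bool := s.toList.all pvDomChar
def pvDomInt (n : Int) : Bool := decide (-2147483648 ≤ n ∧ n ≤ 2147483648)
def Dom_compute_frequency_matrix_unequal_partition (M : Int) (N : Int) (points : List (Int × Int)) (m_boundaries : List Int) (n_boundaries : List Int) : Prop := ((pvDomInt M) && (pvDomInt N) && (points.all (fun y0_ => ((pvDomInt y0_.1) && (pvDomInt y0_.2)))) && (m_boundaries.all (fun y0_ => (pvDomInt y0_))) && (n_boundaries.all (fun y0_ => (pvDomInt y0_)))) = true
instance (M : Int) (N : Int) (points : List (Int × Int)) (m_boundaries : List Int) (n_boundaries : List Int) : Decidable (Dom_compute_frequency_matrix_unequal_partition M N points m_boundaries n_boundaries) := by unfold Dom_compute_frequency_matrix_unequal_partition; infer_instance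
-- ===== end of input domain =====

-- B restructures A's point-major loop (inner break-scans + in-place increments) into staged
-- passes: filter once, then segment-major sweeps that bulk-assign rows/columns, then one tally
-- pass; alternative structure, same exact values.


-- ===== PORT A =====
-- inner loop 'for i in range(segments): if b[i] <= v < b[i+1]: row = i; break' — the break makes it a
-- recursion over the range list; the indices i, i+1 are always in range here, so pyGetD's default is never read
def pvAScan (bs : List Int) (v : Int) : List Int → Option Int
  | [] => none
  | i :: rest =>
      if PySem.List.pyGetD bs i 0 ≤ v ∧ v < PySem.List.pyGetD bs (i + 1) 0 then some i
      else pvAScan bs v rest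

def compute_frequency_matrix_unequal_partition (M : Int) (N : Int) (points : List (Int × Int)) (m_boundaries : List Int) (n_boundaries : List Int) : List (List Int) :=
  let m_segments : Int := (m_boundaries.length : Int) - 1
  let n_segments : Int := (n_boundaries.length : Int) - 1
  let init : List (List Int) :=
    (PySem.List.pyRange 0 m_segments 1).map (fun _ => (PySem.List.pyRange 0 n_segments 1).map (fun _ => (0 : Int)))
  points.foldl (fun (fm : List (List Int)) (p : Int × Int) =>
    if 0 ≤ p.1 ∧ p.1 < N ∧ 0 ≤ p.2 ∧ p.2 < M then
      match pvAScan m_boundaries p.2 (PySem.List.pyRange 0 m_segments 1),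
            pvAScan n_boundaries p.1 (PySem.List.pyRange 0 n_segments 1) with
      -- frequency_matrix[row][col] += 1 ; row, col come out of range(...) so they are ≥ 0 and .toNat is exact
      | some row, some col => fm.modify row.toNat (fun rowL => rowL.modify col.toNat (fun z => z + 1))
      | _, _ => fm
    else fm) init

-- ===== PORT B =====
-- _assign: 'for i, (lo, hi) in enumerate(zip(boundaries, boundaries[1:])): res = [i if r is None and
-- lo <= v < hi else r for r, v in zip(res, values)]' — recursion over the interval list carrying the
-- running index i and the assignment vector res
def pvAssign (vals : List Int) : Int → List (Option Int) → List (Int × Int) → List (Option Int)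
  | _, res, [] => res
  | i, res, (lo, hi) :: rest =>
      pvAssign vals (i + 1)
        (List.zipWith (fun r v => if r = none ∧ lo ≤ v ∧ v < hi then some i else r) res vals) rest

def compute_frequency_matrix_unequal_partition_alt (M : Int) (N : Int) (points : List (Int × Int)) (m_boundaries : List Int) (n_boundaries : List Int) : List (List Int) :=
  let pts : List (Int × Int) := points.filter (fun p => decide (0 ≤ p.1 ∧ p.1 < N ∧ 0 ≤ p.2 ∧ p.2 < M))
  let ys : List Int := pts.map (fun p => p.2)
  let xs : List Int := pts.map (fun p => p.1)
  let rows : List (Option Int) := pvAssign ys 0 (List.replicate ys.length none) (m_boundaries.zip m_boundaries.tail)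
  let cols : List (Option Int) := pvAssign xs 0 (List.replicate xs.length none) (n_boundaries.zip n_boundaries.tail)
  -- '[0] * (len(n_boundaries) - 1)': a negative multiplier yields [] in Python, exactly Int.toNat's clamp
  let init : List (List Int) :=
    (PySem.List.pyRange 0 ((m_boundaries.length : Int) - 1) 1).map
      (fun _ => List.replicate ((n_boundaries.length : Int) - 1).toNat (0 : Int))
  (rows.zip cols).foldl (fun m rc =>
    match rc with
    | (some r, some c) => m.modify r.toNat (fun rowL => rowL.modify c.toNat (fun z => z + 1))
    | (some _, none) => m
    | (none, _) => m) init

-- ===== PRECONDITION & SPEC =====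
def Spec_compute_frequency_matrix_unequal_partition (M : Int) (N : Int) (points : List (Int × Int)) (m_boundaries : List Int) (n_boundaries : List Int) (out : List (List Int)) : Prop := out = compute_frequency_matrix_unequal_partition_alt M N points m_boundaries n_boundaries
instance (M : Int) (N : Int) (points : List (Int × Int)) (m_boundaries : List Int) (n_boundaries : List Int) (out : List (List Int)) : Decidable (Spec_compute_frequency_matrix_unequal_partition M N points m_boundaries n_boundaries out) := by unfold Spec_compute_frequency_matrix_unequal_partition; infer_instance

-- ===== CLAIM (what is proved, stated in full; the proofs are below) =====
def Claim_equal_compute_frequency_matrix_unequal_partition : Prop := ∀ (M : Int) (N : Int) (points : List (Int × Int)) (m_boundaries : List Int) (n_boundaries : List Int), Dom_compute_frequency_matrix_unequal_partition M N points m_boundaries n_boundaries → Spec_compute_frequency_matrix_unequal_partition M N points m_boundaries n_boundaries (compute_frequency_matrix_unequal_partition M N points m_boundaries n_boundaries)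

-- ===== LEMMAS AND PROOFS =====

-- first-match interval index (proof-side characterisation shared by both sides)
def pvFirstCell (v : Int) (i : Int) : List (Int × Int) → Option Int
  | [] => none
  | (lo, hi) :: rest => if lo ≤ v ∧ v < hi then some i else pvFirstCell v (i + 1) rest

-- the (row, col) pair a point's coordinates are classified to
def pvPair (mb nb : List Int) (p : Int × Int) : Option (Int × Int) :=
  match pvFirstCell p.2 0 (mb.zip mb.tail) with
  | some r =>
      match pvFirstCell p.1 0 (nb.zip nb.tail) with
      | some c => some (r, c)
      | none => none
  | none => none

-- the cell a point is classified to (in-range test included)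
def pvCellAt (M N : Int) (mb nb : List Int) (p : Int × Int) : Option (Int × Int) :=
  if 0 ≤ p.1 ∧ p.1 < N ∧ 0 ≤ p.2 ∧ p.2 < M then pvPair mb nb p else none

-- a matrix given by an entry function over the two ranges
def pvRender (ms ns : Int) (f : Int × Int → Int) : List (List Int) :=
  (PySem.List.pyRange 0 ms 1).map (fun i => (PySem.List.pyRange 0 ns 1).map (fun j => f (i, j)))

-- A's index loop over range(len(bs)-1) computes the first-match over adjacent boundary pairs
theorem pvScan_eq_firstCell_aux (bs : List Int) (v : Int) :
    ∀ (k i : Nat), bs.length - i ≤ k →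
      pvAScan bs v (PySem.List.pyRange i ((bs.length : Int) - 1) 1) =
        pvFirstCell v (i : Int) ((bs.drop i).zip (bs.drop i).tail) := by
  intro k
  induction k with
  | zero =>
      intro i h
      have hlen : bs.length ≤ i := by omega
      rw [PySem.List.pyRange_one_eq_nil (by omega), List.drop_eq_nil_of_le hlen]
      simp [pvAScan, pvFirstCell]
  | succ k ih =>
      intro i h
      by_cases hlt : (i : Int) < (bs.length : Int) - 1
      · have hi1 : i + 1 < bs.length := by push_cast at hlt; omega
        have hi : i < bs.length := by omega
        rw [PySem.List.pyRange_one_cons hlt,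
            List.drop_eq_getElem_cons hi, List.drop_eq_getElem_cons hi1,
            List.tail_cons, List.zip_cons_cons]
        have e1 : PySem.List.pyGetD bs (i : Int) 0 = bs[i] := by
          rw [PySem.List.pyGetD_natCast, List.getD_eq_getElem _ _ hi]
        have e2 : PySem.List.pyGetD bs ((i : Int) + 1) 0 = bs[i + 1] := by
          have : ((i : Int) + 1) = ((i + 1 : Nat) : Int) := by push_cast; ring
          rw [this, PySem.List.pyGetD_natCast, List.getD_eq_getElem _ _ hi1]
        by_cases hc : bs[i] ≤ v ∧ v < bs[i + 1]
        · simp [pvAScan, pvFirstCell, e1, e2, hc]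
        · have hrec := ih (i + 1) (by omega)
          rw [List.drop_eq_getElem_cons hi1, List.tail_cons] at hrec
          push_cast at hrec
          simp only [pvAScan, pvFirstCell, e1, e2, if_neg hc]
          exact hrec
      · rw [PySem.List.pyRange_one_eq_nil (by omega)]
        have hlen : bs.length ≤ i + 1 := by push_cast at hlt; omega
        have : (bs.drop i).length ≤ 1 := by simp [List.length_drop]; omega
        cases hdi : bs.drop i with
        | nil => simp [pvAScan, pvFirstCell]
        | cons a t =>
            rw [hdi] at this
            have ht : t = [] := by
              cases t with
              | nil => rfl
              | cons b t' => simp at this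
            subst ht
            simp [pvAScan, pvFirstCell]

theorem pvScan_eq_firstCell (bs : List Int) (v : Int) :
    pvAScan bs v (PySem.List.pyRange 0 ((bs.length : Int) - 1) 1) =
      pvFirstCell v 0 (bs.zip bs.tail) := by
  simpa using pvScan_eq_firstCell_aux bs v bs.length 0 (by omega)

theorem pvFirstCell_bound {v : Int} :
    ∀ {ivs : List (Int × Int)} {i r : Int}, pvFirstCell v i ivs = some r →
      i ≤ r ∧ r < i + (ivs.length : Int) := by
  intro ivs
  induction ivs with
  | nil => intro i r h; simp [pvFirstCell] at h
  | cons a t ih =>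
      intro i r h
      by_cases hc : a.1 ≤ v ∧ v < a.2
      · simp [pvFirstCell, hc] at h
        subst h
        simp only [List.length_cons]
        push_cast
        omega
      · simp [pvFirstCell, hc] at h
        have := ih h
        simp only [List.length_cons]
        push_cast at this ⊢
        omega

-- bumping entry (r, c) of a rendered matrix renders the bumped entry function
theorem pvRender_bump (ms ns : Int) (f : Int × Int → Int) (r c : Int)
    (hr0 : 0 ≤ r) (_hr : r < ms) (hc0 : 0 ≤ c) (_hc : c < ns) :
    (pvRender ms ns f).modify r.toNat (fun rowL => rowL.modify c.toNat (fun z => z + 1)) =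
      pvRender ms ns (fun q => if q = (r, c) then f q + 1 else f q) := by
  apply List.ext_getElem
  · simp [pvRender]
  · intro k h1 h2
    rw [List.getElem_modify]
    by_cases hkr : r.toNat = k
    · rw [if_pos hkr]
      have hkInt : (k : Int) = r := by omega
      apply List.ext_getElem
      · simp [pvRender]
      · intro j j1 j2
        rw [List.getElem_modify]
        simp only [pvRender, List.getElem_map, PySem.List.getElem_pyRange_one, zero_add]
        by_cases hjc : c.toNat = j
        · have hjInt : (j : Int) = c := by omega
          rw [if_pos hjc, if_pos (by rw [hkInt, hjInt])]
        · have hjInt : (j : Int) ≠ c := by omega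
          rw [if_neg hjc, if_neg (by simp [Prod.ext_iff, hjInt])]
    · rw [if_neg hkr]
      have hkInt : (k : Int) ≠ r := by omega
      simp only [pvRender, List.getElem_map, PySem.List.getElem_pyRange_one, zero_add]
      apply List.map_congr_left
      intro j _
      rw [if_neg (by simp [Prod.ext_iff, hkInt])]

theorem pvRender_congr (ms ns : Int) (f g : Int × Int → Int) (h : ∀ q, f q = g q) :
    pvRender ms ns f = pvRender ms ns g := by
  have : f = g := funext h
  rw [this]

theorem pvAScan_mem {bs : List Int} {v : Int} {l : List Int} {r : Int}
    (h : pvAScan bs v l = some r) : r ∈ l := by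
  induction l with
  | nil => simp [pvAScan] at h
  | cons a t ih =>
      by_cases hc : PySem.List.pyGetD bs a 0 ≤ v ∧ v < PySem.List.pyGetD bs (a + 1) 0
      · simp [pvAScan, hc] at h; simp [h]
      · simp [pvAScan, hc] at h; exact List.mem_cons_of_mem _ (ih h)

-- A's whole point loop, from any rendered matrix
theorem pvFoldA (M N : Int) (mb nb : List Int) :
    ∀ (ps : List (Int × Int)) (f : Int × Int → Int),
      ps.foldl (fun fm p =>
        if 0 ≤ p.1 ∧ p.1 < N ∧ 0 ≤ p.2 ∧ p.2 < M then
          match pvAScan mb p.2 (PySem.List.pyRange 0 ((mb.length : Int) - 1) 1),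
                pvAScan nb p.1 (PySem.List.pyRange 0 ((nb.length : Int) - 1) 1) with
          | some row, some col => fm.modify row.toNat (fun rowL => rowL.modify col.toNat (fun z => z + 1))
          | _, _ => fm
        else fm) (pvRender ((mb.length : Int) - 1) ((nb.length : Int) - 1) f) =
      pvRender ((mb.length : Int) - 1) ((nb.length : Int) - 1)
        (fun q => f q + ((ps.filterMap (pvCellAt M N mb nb)).count q : Int)) := by
  intro ps
  induction ps with
  | nil =>
      intro f
      simp only [List.foldl_nil, List.filterMap_nil, List.count_nil]
      exact pvRender_congr _ _ _ _ (fun q => by simp)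
  | cons p t ih =>
      intro f
      rw [List.foldl_cons]
      by_cases hin : 0 ≤ p.1 ∧ p.1 < N ∧ 0 ≤ p.2 ∧ p.2 < M
      · simp only [if_pos hin]
        cases hm : pvAScan mb p.2 (PySem.List.pyRange 0 ((mb.length : Int) - 1) 1) with
        | none =>
            rw [ih]
            have hcell : pvCellAt M N mb nb p = none := by
              rw [pvCellAt, if_pos hin, pvPair, ← pvScan_eq_firstCell, hm]
            rw [List.filterMap_cons, hcell]
        | some r =>
            cases hn : pvAScan nb p.1 (PySem.List.pyRange 0 ((nb.length : Int) - 1) 1) with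
            | none =>
                rw [ih]
                have hcell : pvCellAt M N mb nb p = none := by
                  rw [pvCellAt, if_pos hin, pvPair, ← pvScan_eq_firstCell, ← pvScan_eq_firstCell, hm, hn]
                rw [List.filterMap_cons, hcell]
            | some c =>
                simp only []
                have hrB := PySem.List.mem_pyRange_one.mp (pvAScan_mem hm)
                have hcB := PySem.List.mem_pyRange_one.mp (pvAScan_mem hn)
                rw [pvRender_bump _ _ f r c hrB.1 hrB.2 hcB.1 hcB.2, ih]
                have hcell : pvCellAt M N mb nb p = some (r, c) := by
                  rw [pvCellAt, if_pos hin, pvPair, ← pvScan_eq_firstCell, ← pvScan_eq_firstCell, hm, hn]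
                rw [List.filterMap_cons, hcell]
                apply pvRender_congr
                intro q
                rw [List.count_cons]
                by_cases hq : q = (r, c)
                · rw [if_pos hq, if_pos (by simp [hq])]
                  push_cast
                  ring
                · rw [if_neg hq, if_neg (by simp; exact fun h => hq h.symm)]
                  push_cast
                  ring
      · simp only [if_neg hin]
        rw [ih]
        have hcell : pvCellAt M N mb nb p = none := by
          rw [pvCellAt, if_neg hin]
        rw [List.filterMap_cons, hcell]

-- zipWith against the same right list, where the left is a map of it, fuses to a map
theorem pvZipWithMap {α β : Type} (f : β → α → β) (g : α → β) :
    ∀ (vals : List α), List.zipWith f (vals.map g) vals = vals.map (fun v => f (g v) v) := by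
  intro vals
  induction vals with
  | nil => simp
  | cons v t ih => simp [ih]

-- B's segment-major sweep computes, per value, the first interval index containing it
theorem pvAssign_map (vals : List Int) :
    ∀ (ivs : List (Int × Int)) (i : Int) (g : Int → Option Int),
      pvAssign vals i (vals.map g) ivs =
        vals.map (fun v => match g v with | some j => some j | none => pvFirstCell v i ivs) := by
  intro ivs
  induction ivs with
  | nil =>
      intro i g
      simp only [pvAssign]
      apply List.map_congr_left
      intro v _
      cases g v <;> simp [pvFirstCell]
  | cons a t ih =>
      intro i g
      obtain ⟨lo, hi⟩ := a
      simp only [pvAssign]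
      rw [pvZipWithMap, ih]
      apply List.map_congr_left
      intro v _
      cases g v with
      | some j => simp
      | none =>
          by_cases hc : lo ≤ v ∧ v < hi
          · simp [hc, pvFirstCell]
          · simp [hc, pvFirstCell]

-- filterMap after filter, as one filterMap
theorem pvFilterMapFilter {α β : Type} (q : α → Bool) (h : α → Option β) :
    ∀ (l : List α), (l.filter q).filterMap h = l.filterMap (fun a => if q a then h a else none) := by
  intro l
  induction l with
  | nil => simp
  | cons a t ih =>
      by_cases hq : q a
      · simp [List.filterMap_cons, hq, ih]
      · simp [hq, ih]

-- B's tally loop over the paired assignments, from any rendered matrix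
theorem pvFoldB (ms ns : Int) :
    ∀ (l : List (Option Int × Option Int)) (f : Int × Int → Int),
      (∀ r c, (some r, some c) ∈ l → 0 ≤ r ∧ r < ms ∧ 0 ≤ c ∧ c < ns) →
      l.foldl (fun m rc =>
        match rc with
        | (some r, some c) => m.modify r.toNat (fun rowL => rowL.modify c.toNat (fun z => z + 1))
        | (some _, none) => m
        | (none, _) => m) (pvRender ms ns f) =
      pvRender ms ns (fun q => f q +
        ((l.filterMap (fun rc => match rc with | (some r, some c) => some (r, c) | _ => none)).count q : Int)) := by
  intro l
  induction l with
  | nil =>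
      intro f _
      simp only [List.foldl_nil, List.filterMap_nil, List.count_nil]
      exact pvRender_congr _ _ _ _ (fun q => by simp)
  | cons rc t ih =>
      intro f hmem
      rw [List.foldl_cons]
      obtain ⟨a, b⟩ := rc
      cases a with
      | none =>
          rw [ih _ (fun r c h => hmem r c (List.mem_cons_of_mem _ h))]
          simp
      | some r =>
          cases b with
          | none =>
              rw [ih _ (fun r c h => hmem r c (List.mem_cons_of_mem _ h))]
              simp
          | some c =>
              have hb := hmem r c (List.mem_cons_self)
              simp only []
              rw [pvRender_bump _ _ f r c hb.1 hb.2.1 hb.2.2.1 hb.2.2.2,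
                  ih _ (fun r c h => hmem r c (List.mem_cons_of_mem _ h))]
              rw [List.filterMap_cons]
              simp only []
              apply pvRender_congr
              intro q
              rw [List.count_cons]
              by_cases hq : q = (r, c)
              · rw [if_pos hq, if_pos (by simp [hq])]
                push_cast
                ring
              · rw [if_neg hq, if_neg (by simp; exact fun h => hq h.symm)]
                push_cast
                ring

-- B's initial matrix is the rendered zero matrix
theorem pvInitB (ms ns : Int) :
    (PySem.List.pyRange 0 ms 1).map (fun _ => List.replicate ns.toNat (0 : Int)) =
      pvRender ms ns (fun _ => (0 : Int)) := by
  unfold pvRender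
  apply List.map_congr_left
  intro i _
  apply List.ext_getElem
  · simp [PySem.List.length_pyRange_one]
  · intro j h1 h2
    simp

-- ===== VERDICT (by name: the statement is the Claim_ definition above) =====
theorem compute_frequency_matrix_unequal_partition_spec : Claim_equal_compute_frequency_matrix_unequal_partition := by
  intro M N points mb nb _
  unfold Spec_compute_frequency_matrix_unequal_partition
  unfold compute_frequency_matrix_unequal_partition compute_frequency_matrix_unequal_partition_alt
  simp only []
  -- A side
  rw [show ((PySem.List.pyRange 0 ((mb.length : Int) - 1) 1).map
        (fun _ => (PySem.List.pyRange 0 ((nb.length : Int) - 1) 1).map (fun _ => (0 : Int)))) =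
      pvRender ((mb.length : Int) - 1) ((nb.length : Int) - 1) (fun _ => (0 : Int)) from rfl]
  rw [pvFoldA M N mb nb points (fun _ => (0 : Int))]
  -- B side: the two assignment sweeps are first-match maps over the filtered points
  have hrows : pvAssign (List.map (fun p => p.2) (points.filter (fun p => decide (0 ≤ p.1 ∧ p.1 < N ∧ 0 ≤ p.2 ∧ p.2 < M)))) 0
        (List.replicate (List.map (fun p => p.2) (points.filter (fun p => decide (0 ≤ p.1 ∧ p.1 < N ∧ 0 ≤ p.2 ∧ p.2 < M)))).length none)
        (mb.zip mb.tail) =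
      (points.filter (fun p => decide (0 ≤ p.1 ∧ p.1 < N ∧ 0 ≤ p.2 ∧ p.2 < M))).map
        (fun p => pvFirstCell p.2 0 (mb.zip mb.tail)) := by
    rw [← List.map_const', pvAssign_map, List.map_map]
    rfl
  have hcols : pvAssign (List.map (fun p => p.1) (points.filter (fun p => decide (0 ≤ p.1 ∧ p.1 < N ∧ 0 ≤ p.2 ∧ p.2 < M)))) 0
        (List.replicate (List.map (fun p => p.1) (points.filter (fun p => decide (0 ≤ p.1 ∧ p.1 < N ∧ 0 ≤ p.2 ∧ p.2 < M)))).length none)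
        (nb.zip nb.tail) =
      (points.filter (fun p => decide (0 ≤ p.1 ∧ p.1 < N ∧ 0 ≤ p.2 ∧ p.2 < M))).map
        (fun p => pvFirstCell p.1 0 (nb.zip nb.tail)) := by
    rw [← List.map_const', pvAssign_map, List.map_map]
    rfl
  rw [hrows, hcols, List.zip_map', pvInitB]
  rw [pvFoldB ((mb.length : Int) - 1) ((nb.length : Int) - 1) _ (fun _ => (0 : Int))]
  · -- both sides render the same counts
    apply pvRender_congr
    intro q
    congr 3
    rw [List.filterMap_map, pvFilterMapFilter]
    apply List.filterMap_congr
    intro p _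
    by_cases hin : 0 ≤ p.1 ∧ p.1 < N ∧ 0 ≤ p.2 ∧ p.2 < M
    · simp only [pvCellAt, if_pos hin, decide_eq_true hin, if_pos]
      cases h1 : pvFirstCell p.2 0 (mb.zip mb.tail) <;>
        cases h2 : pvFirstCell p.1 0 (nb.zip nb.tail) <;>
          simp [pvPair, Function.comp, h1, h2]
    · simp [pvCellAt, hin]
  · -- bounds for every (some r, some c) pair in the assignment list
    intro r c hmem
    rw [List.mem_map] at hmem
    obtain ⟨p, _, hp⟩ := hmem
    have h1 : pvFirstCell p.2 0 (mb.zip mb.tail) = some r := by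
      have := congrArg Prod.fst hp; simpa using this
    have h2 : pvFirstCell p.1 0 (nb.zip nb.tail) = some c := by
      have := congrArg Prod.snd hp; simpa using this
    have b1 := pvFirstCell_bound h1
    have b2 := pvFirstCell_bound h2
    have hm1 : mb ≠ [] := by
      intro h; subst h; simp [pvFirstCell] at h1
    have hn1 : nb ≠ [] := by
      intro h; subst h; simp [pvFirstCell] at h2
    have lm : ((mb.zip mb.tail).length : Int) ≤ (mb.length : Int) - 1 := by
      have := List.length_eq_zero_iff.not.mpr hm1
      simp [List.length_zip, List.length_tail]
      omega
    have ln : ((nb.zip nb.tail).length : Int) ≤ (nb.length : Int) - 1 := by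
      have := List.length_eq_zero_iff.not.mpr hn1
      simp [List.length_zip, List.length_tail]
      omega
    refine ⟨b1.1, by omega, b2.1, by omega⟩
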